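-- pv_equiv track=rewrite | github.com/calico/do_qtl | tests/test_io.py | make_mouse_ids
-- ===== SOURCE A (Python) =====
-- TREATMENTS = ['AL', '1D', '2D', '40', '20']
--
-- def make_mouse_ids(treatments=TREATMENTS, mice_per_treatment=10):
--     mouse = 1
--     mouse_ids = []
--     for treatment in treatments:
--         for _ in range(mice_per_treatment):
--             mouse_ids.append(f'Calico-{treatment}-{mouse:04}')
--             mouse += 1
--     return mouse_ids
-- ===== SOURCE B (Python) =====
-- TREATMENTS = ['AL', '1D', '2D', '40', '20']
--
-- def make_mouse_ids(treatments=TREATMENTS, mice_per_treatment=10):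
--     mouse_ids = []
--     for i in range(len(treatments) * mice_per_treatment):
--         mouse_ids.append(f'Calico-{treatments[i // mice_per_treatment]}-{i + 1:04}')
--     return mouse_ids
-- ===== Notes on version B (the rewrite author's own statement) =====
-- stated objective: simpler
-- what changed: Replaces the two nested loops and the running `mouse` counter with one flat loop over range(len(treatments)*mice_per_treatment), deriving the treatment by index division and the mouse number arithmetically from the loop index.
import Mathlib
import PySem

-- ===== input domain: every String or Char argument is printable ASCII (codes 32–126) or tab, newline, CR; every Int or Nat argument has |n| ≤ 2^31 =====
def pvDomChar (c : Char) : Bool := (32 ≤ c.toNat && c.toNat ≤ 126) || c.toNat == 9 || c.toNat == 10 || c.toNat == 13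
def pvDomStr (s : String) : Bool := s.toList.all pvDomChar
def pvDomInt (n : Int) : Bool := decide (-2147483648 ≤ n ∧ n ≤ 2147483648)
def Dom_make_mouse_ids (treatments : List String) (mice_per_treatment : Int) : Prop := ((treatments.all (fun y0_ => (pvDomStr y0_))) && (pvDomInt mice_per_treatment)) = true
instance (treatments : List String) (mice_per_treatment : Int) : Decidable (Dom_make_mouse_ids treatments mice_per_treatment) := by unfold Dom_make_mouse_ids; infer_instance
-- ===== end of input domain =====

-- B flattens A's two nested loops into one flat indexed loop, deriving treatment and mouse
-- number arithmetically from the loop index (objective: simpler decomposition; same cost).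


-- ===== PORT A =====
-- f'Calico-{t}-{mouse:04}' — zero-pad to width 4 (mouse is always ≥ 1 here, so the
-- sign-handling of Python's format never fires; exact on positive arguments)
def pvId (t : String) (mouse : Int) : String :=
  let s := PySem.Int.toStr mouse
  "Calico-" ++ t ++ "-" ++ String.ofList (List.replicate (4 - s.toList.length) '0') ++ s

-- literal port of A: nested loops, running mouse counter, list built by append
def make_mouse_ids (treatments : List String) (mice_per_treatment : Int) : List String :=
  (treatments.foldl
    (fun st t =>
      (List.range mice_per_treatment.toNat).foldl
        (fun st2 _ => (st2.1 + 1, st2.2 ++ [pvId t st2.1])) st)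
    ((1 : Int), ([] : List String))).2

-- ===== PORT B =====
-- literal port of B: one flat loop over range(len(treatments) * mice_per_treatment)
def make_mouse_ids_alt (treatments : List String) (mice_per_treatment : Int) : List String :=
  (PySem.List.pyRange 0 ((treatments.length : Int) * mice_per_treatment) 1).map
    (fun i =>
      pvId ((PySem.List.pyGet? treatments (PySem.Int.floordiv i mice_per_treatment)).getD "")
           (i + 1))

-- ===== PRECONDITION & SPEC =====
def Spec_make_mouse_ids (treatments : List String) (mice_per_treatment : Int) (out : List String) : Prop := out = make_mouse_ids_alt treatments mice_per_treatment
instance (treatments : List String) (mice_per_treatment : Int) (out : List String) : Decidable (Spec_make_mouse_ids treatments mice_per_treatment out) := by unfold Spec_make_mouse_ids; infer_instance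

-- ===== CLAIM (what is proved, stated in full; the proofs are below) =====
def Claim_equal_make_mouse_ids : Prop := ∀ (treatments : List String) (mice_per_treatment : Int), Dom_make_mouse_ids treatments mice_per_treatment → Spec_make_mouse_ids treatments mice_per_treatment (make_mouse_ids treatments mice_per_treatment)

-- ===== LEMMAS AND PROOFS =====

-- reference shape: per-treatment blocks of ids, starting mouse counter c
def pvRef (ts : List String) (m' : Nat) (c : Int) : List String :=
  match ts with
  | [] => []
  | t :: ts => (List.range m').map (fun k : Nat => pvId t (c + (k : Int))) ++ pvRef ts m' (c + m')

-- A's inner loop, characterised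
theorem pvInner (g : Int → String) (r : Nat) (c : Int) (acc : List String) :
    (List.range r).foldl (fun st2 _ => (st2.1 + 1, st2.2 ++ [g st2.1])) (c, acc)
      = (c + r, acc ++ (List.range r).map (fun k : Nat => g (c + (k : Int)))) := by
  induction r generalizing acc with
  | zero => simp
  | succ r ih =>
      rw [List.range_succ, List.foldl_append, ih]
      simp only [List.foldl_cons, List.foldl_nil, List.map_append, Prod.mk.injEq]
      constructor
      · push_cast; ring
      · simp [List.append_assoc]

-- A's outer loop, characterised
theorem pvAside (ts : List String) (m' : Nat) (c : Int) (acc : List String) :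
    ts.foldl
      (fun st t =>
        (List.range m').foldl (fun st2 _ => (st2.1 + 1, st2.2 ++ [pvId t st2.1])) st)
      (c, acc)
      = (c + ts.length * m', acc ++ pvRef ts m' c) := by
  induction ts generalizing c acc with
  | nil => simp [pvRef]
  | cons t ts ih =>
      simp only [List.foldl_cons, pvInner, ih, pvRef, Prod.mk.injEq]
      constructor
      · push_cast [List.length_cons]; ring
      · rw [List.append_assoc]

-- B's flat loop equals the reference shape (m' > 0)
theorem pvBside (ts : List String) (m' : Nat) (hm : 0 < m') (c : Int) :
    (PySem.List.pyRange 0 ((ts.length : Int) * (m' : Int)) 1).map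
        (fun i =>
          pvId ((PySem.List.pyGet? ts (PySem.Int.floordiv i (m' : Int))).getD "") (c + i))
      = pvRef ts m' c := by
  induction ts generalizing c with
  | nil =>
      rw [PySem.List.pyRange_one_eq_nil (by simp)]
      simp [pvRef]
  | cons t ts ih =>
      rw [PySem.List.pyRange_one]
      have hN : ((t :: ts).length : Int) * (m' : Int) - 0 = ((m' + ts.length * m' : Nat) : Int) := by
        push_cast [List.length_cons]; ring
      rw [hN, Int.toNat_natCast, List.range_add]
      simp only [List.map_append, List.map_map, pvRef]
      congr 1
      · apply List.map_congr_left
        intro k hk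
        rw [List.mem_range] at hk
        simp only [Function.comp_apply, zero_add]
        rw [PySem.Int.floordiv_natCast k m', Nat.div_eq_of_lt hk]
        simp
      · have h := ih (c + m')
        rw [PySem.List.pyRange_one] at h
        have hN2 : ((ts.length : Int) * (m' : Int) - 0) = ((ts.length * m' : Nat) : Int) := by
          push_cast; ring
        rw [hN2, Int.toNat_natCast, List.map_map] at h
        rw [← h]
        apply List.map_congr_left
        intro k hk
        simp only [Function.comp_apply, zero_add]
        have hdiv : PySem.Int.floordiv ((m' + k : Nat) : Int) (m' : Int) = (((m' + k) / m' : Nat) : Int) :=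
          PySem.Int.floordiv_natCast _ m'
        have hq : (m' + k) / m' = k / m' + 1 := by
          rw [Nat.add_comm m' k, Nat.add_div_right k hm]
        have hget : PySem.List.pyGet? (t :: ts) (((k / m' : Nat) : Int) + 1)
            = PySem.List.pyGet? ts ((k / m' : Nat) : Int) :=
          PySem.List.pyGet?_cons_succ ..
        rw [hdiv, hq, Nat.cast_add, Nat.cast_one, hget, PySem.Int.floordiv_natCast k m']
        congr 1
        push_cast; ring

-- ===== VERDICT (by name: the statement is the Claim_ definition above) =====
theorem make_mouse_ids_spec : Claim_equal_make_mouse_ids := by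
  intro ts m _
  show make_mouse_ids ts m = make_mouse_ids_alt ts m
  by_cases hm : m ≤ 0
  · -- both empty
    have hA : make_mouse_ids ts m = [] := by
      unfold make_mouse_ids
      have : m.toNat = 0 := Int.toNat_of_nonpos hm
      rw [this]
      induction ts with
      | nil => simp
      | cons t ts ih => simpa using ih
    have hB : make_mouse_ids_alt ts m = [] := by
      unfold make_mouse_ids_alt
      rw [PySem.List.pyRange_one_eq_nil]
      · rfl
      · exact mul_nonpos_of_nonneg_of_nonpos (by positivity) hm
    rw [hA, hB]
  · have hm2 : (0:Int) < m := by omega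
    have hm' : (0 : Nat) < m.toNat := by omega
    have hcast : ((m.toNat : Nat) : Int) = m := Int.toNat_of_nonneg (le_of_lt hm2)
    unfold make_mouse_ids make_mouse_ids_alt
    have hA := pvAside ts m.toNat 1 []
    rw [hA]
    simp only [List.nil_append]
    have hB := pvBside ts m.toNat hm' 1
    rw [hcast] at hB
    rw [← hB]
    apply List.map_congr_left
    intro i _
    congr 1
    ring
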